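-- pv_equiv track=rewrite | github.com/amin-jalilzadeh-tu/- | idf_objects/eequip/schedule_def.py | apply_schedule_overrides_to_schedules
-- ===== SOURCE A (Python) =====
-- def apply_schedule_overrides_to_schedules(base_schedules, overrides):
--     """Merge schedule overrides into ``base_schedules`` in-place."""
--     for cat, stypes in overrides.items():
--         base_schedules.setdefault(cat, {})
--         for stype, days in stypes.items():
--             base_schedules[cat].setdefault(stype, {})
--             for day_type, blocks in days.items():
--                 base_schedules[cat][stype][day_type] = blocks
--     return base_schedules
-- ===== SOURCE B (Python) =====
-- def apply_schedule_overrides_to_schedules(base_schedules, overrides):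
--     """Merge schedule overrides into ``base_schedules`` in-place,
--     via a depth-driven recursive merge instead of three nested loops."""
--     def merge(base, ov, level):
--         for k, v in ov.items():
--             if level < 2:
--                 merge(base.setdefault(k, {}), v, level + 1)
--             else:
--                 base[k] = v
--     merge(base_schedules, overrides, 0)
--     return base_schedules
-- ===== Notes on version B (the rewrite author's own statement) =====
-- stated objective: alternative
-- what changed: Replaced the three hard-coded nested loops (with repeated indexing through base[cat][stype]) by one recursive merge helper driven by a depth counter that setdefault-descends for two levels and overwrites at the leaves.
import Mathlib
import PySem

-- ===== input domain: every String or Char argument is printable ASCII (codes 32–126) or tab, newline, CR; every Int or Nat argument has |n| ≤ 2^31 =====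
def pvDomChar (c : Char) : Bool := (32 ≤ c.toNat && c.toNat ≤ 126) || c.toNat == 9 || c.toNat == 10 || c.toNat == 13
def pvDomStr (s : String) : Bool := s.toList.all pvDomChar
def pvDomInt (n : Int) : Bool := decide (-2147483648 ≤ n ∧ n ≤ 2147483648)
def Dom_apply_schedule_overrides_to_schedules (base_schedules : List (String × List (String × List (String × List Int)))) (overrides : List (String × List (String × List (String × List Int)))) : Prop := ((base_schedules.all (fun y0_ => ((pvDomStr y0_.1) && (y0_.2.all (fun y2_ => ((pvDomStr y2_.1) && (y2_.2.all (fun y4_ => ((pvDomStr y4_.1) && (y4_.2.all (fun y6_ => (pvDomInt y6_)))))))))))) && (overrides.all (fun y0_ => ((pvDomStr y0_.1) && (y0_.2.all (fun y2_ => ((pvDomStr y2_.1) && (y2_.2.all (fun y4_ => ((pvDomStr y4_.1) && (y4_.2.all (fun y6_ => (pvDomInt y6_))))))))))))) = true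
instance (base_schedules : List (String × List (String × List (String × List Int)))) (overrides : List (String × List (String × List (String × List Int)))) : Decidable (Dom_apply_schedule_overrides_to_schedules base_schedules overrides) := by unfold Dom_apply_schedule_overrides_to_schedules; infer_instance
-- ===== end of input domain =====

-- ===== PORT A =====
-- B merges via one depth-driven recursive helper instead of A's three nested loops.
-- Both Pythons mutate base_schedules in place and return it; the equivalence proved
-- here is about the RETURN value (the final contents).
-- Shared primitive: d[k] = v on an association list (replace first match, else append).
def pvSetAt {α : Type} : List (String × α) → String → α → List (String × α)
  | [], k, v => [(k, v)]
  | (k', v') :: rest, k, v =>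
    if k' = k then (k, v) :: rest else (k', v') :: pvSetAt rest k v

-- Shared primitive: in-place mutation of d[k] (first match); no-op when k is absent.
def pvModifyAt {α : Type} : List (String × α) → String → (α → α) → List (String × α)
  | [], _, _ => []
  | (k', v') :: rest, k, f =>
    if k' = k then (k, f v') :: rest else (k', v') :: pvModifyAt rest k f

def pvHasKey {α : Type} (xs : List (String × α)) (k : String) : Bool :=
  xs.any (fun p => p.1 == k)

-- d.setdefault(k, dflt) (return value discarded, only the mutation kept)
def pvSetdefault {α : Type} (xs : List (String × α)) (k : String) (d : α) : List (String × α) :=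
  if pvHasKey xs k then xs else xs ++ [(k, d)]

def apply_schedule_overrides_to_schedules (base_schedules : List (String × List (String × List (String × List Int)))) (overrides : List (String × List (String × List (String × List Int)))) : List (String × List (String × List (String × List Int))) :=
  overrides.foldl (fun bs catp =>
    -- base_schedules.setdefault(cat, {})
    let bs := pvSetdefault bs catp.1 []
    catp.2.foldl (fun bs stp =>
      -- base_schedules[cat].setdefault(stype, {})
      let bs := pvModifyAt bs catp.1 (fun d1 => pvSetdefault d1 stp.1 [])
      stp.2.foldl (fun bs dayp =>
        -- base_schedules[cat][stype][day_type] = blocks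
        pvModifyAt bs catp.1 (fun d1 => pvModifyAt d1 stp.1 (fun d2 => pvSetAt d2 dayp.1 dayp.2)))
        bs) bs) base_schedules

-- ===== PORT B =====
-- Source B: merge(base.setdefault(k, {}), v, level+1) — setdefault then mutate the
-- returned sub-dict in place = replace first match by the merged value, else append.
def pvSetWith {α : Type} (xs : List (String × α)) (k : String) (f : α → α) (d : α) : List (String × α) :=
  if pvHasKey xs k then pvModifyAt xs k f else xs ++ [(k, f d)]

-- Source B's merge at level 2: base[k] = v for each override item
def pvMerge2 (base : List (String × List Int)) (ov : List (String × List Int)) : List (String × List Int) :=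
  ov.foldl (fun b p => pvSetAt b p.1 p.2) base

-- Source B's merge at level 1 (level < 2: recurse into the sub-dict)
def pvMerge1 (base : List (String × List (String × List Int))) (ov : List (String × List (String × List Int))) : List (String × List (String × List Int)) :=
  ov.foldl (fun b p => pvSetWith b p.1 (fun old => pvMerge2 old p.2) []) base

-- Source B's merge at level 0 (the Python level counter becomes three typed instances)
def pvMerge0 (base : List (String × List (String × List (String × List Int)))) (ov : List (String × List (String × List (String × List Int)))) : List (String × List (String × List (String × List Int))) :=
  ov.foldl (fun b p => pvSetWith b p.1 (fun old => pvMerge1 old p.2) []) base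

def apply_schedule_overrides_to_schedules_alt (base_schedules : List (String × List (String × List (String × List Int)))) (overrides : List (String × List (String × List (String × List Int)))) : List (String × List (String × List (String × List Int))) :=
  pvMerge0 base_schedules overrides

-- ===== PRECONDITION & SPEC =====
-- explicit DecidableEq chain (plain infer_instance is too slow on this nested type)
def pvDE0 : DecidableEq (List (String × List (String × List (String × List Int)))) :=
  @instDecidableEqList _ (@instDecidableEqProd _ _ _
    (@instDecidableEqList _ (@instDecidableEqProd _ _ _
      (@instDecidableEqList _ (@instDecidableEqProd _ _ _
        (@instDecidableEqList _ _))))))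

def Spec_apply_schedule_overrides_to_schedules (base_schedules : List (String × List (String × List (String × List Int)))) (overrides : List (String × List (String × List (String × List Int)))) (out : List (String × List (String × List (String × List Int)))) : Prop := out = apply_schedule_overrides_to_schedules_alt base_schedules overrides
instance (base_schedules : List (String × List (String × List (String × List Int)))) (overrides : List (String × List (String × List (String × List Int)))) (out : List (String × List (String × List (String × List Int)))) : Decidable (Spec_apply_schedule_overrides_to_schedules base_schedules overrides out) := by unfold Spec_apply_schedule_overrides_to_schedules; exact pvDE0 _ _

-- ===== CLAIM (what is proved, stated in full; the proofs are below) =====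
def Claim_equal_apply_schedule_overrides_to_schedules : Prop := ∀ (base_schedules : List (String × List (String × List (String × List Int)))) (overrides : List (String × List (String × List (String × List Int)))), Dom_apply_schedule_overrides_to_schedules base_schedules overrides → Spec_apply_schedule_overrides_to_schedules base_schedules overrides (apply_schedule_overrides_to_schedules base_schedules overrides)

-- ===== LEMMAS AND PROOFS =====

-- two in-place mutations at the same key compose
theorem pvModifyAt_pvModifyAt {α : Type} (xs : List (String × α)) (k : String) (f g : α → α) :
    pvModifyAt (pvModifyAt xs k f) k g = pvModifyAt xs k (fun v => g (f v)) := by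
  induction xs with
  | nil => rfl
  | cons p rest ih =>
    obtain ⟨k', v'⟩ := p
    by_cases h : k' = k
    · simp only [pvModifyAt, if_pos h, if_true]
    · simp only [pvModifyAt, if_neg h, ih]

-- mutating with the identity is a no-op
theorem pvModifyAt_id {α : Type} (xs : List (String × α)) (k : String) :
    pvModifyAt xs k (fun v => v) = xs := by
  induction xs with
  | nil => rfl
  | cons p rest ih =>
    obtain ⟨k', v'⟩ := p
    by_cases h : k' = k
    · simp only [pvModifyAt, h, if_true]
    · simp only [pvModifyAt, if_neg h, ih]

-- a loop that only mutates at key k commutes with pvModifyAt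
theorem pvFoldl_pvModifyAt {α β : Type} (l : List β) (xs : List (String × α)) (k : String)
    (h : β → α → α) :
    l.foldl (fun xs b => pvModifyAt xs k (h b)) xs
      = pvModifyAt xs k (fun v => l.foldl (fun v b => h b v) v) := by
  induction l generalizing xs with
  | nil => simp only [List.foldl_nil, pvModifyAt_id]
  | cons b t ih =>
    simp only [List.foldl_cons]
    rw [ih, pvModifyAt_pvModifyAt]

theorem pvModifyAt_append_absent {α : Type} (xs : List (String × α)) (k : String) (d : α)
    (f : α → α) (h : pvHasKey xs k = false) :
    pvModifyAt (xs ++ [(k, d)]) k f = xs ++ [(k, f d)] := by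
  induction xs with
  | nil => simp [pvModifyAt]
  | cons p rest ih =>
    obtain ⟨k', v'⟩ := p
    simp only [pvHasKey, List.any_cons, Bool.or_eq_false_iff, beq_eq_false_iff_ne, ne_eq] at h
    simp only [List.cons_append, pvModifyAt, if_neg h.1, ih (by simpa [pvHasKey] using h.2)]

-- setdefault followed by an in-place mutation at the same key is B's upsert
theorem pvModifyAt_pvSetdefault {α : Type} (xs : List (String × α)) (k : String) (d : α)
    (f : α → α) :
    pvModifyAt (pvSetdefault xs k d) k f = pvSetWith xs k f d := by
  unfold pvSetdefault pvSetWith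
  by_cases h : pvHasKey xs k
  · simp only [h, if_true]
  · rw [if_neg h, if_neg h, pvModifyAt_append_absent xs k d f (by simpa using h)]

-- one step of A's outer loop equals one step of B's level-0 merge
theorem pvStep_eq (bs : List (String × List (String × List (String × List Int))))
    (catp : String × List (String × List (String × List Int))) :
    (catp.2.foldl (fun bs stp =>
        let bs := pvModifyAt bs catp.1 (fun d1 => pvSetdefault d1 stp.1 [])
        stp.2.foldl (fun bs dayp =>
          pvModifyAt bs catp.1 (fun d1 => pvModifyAt d1 stp.1 (fun d2 => pvSetAt d2 dayp.1 dayp.2)))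
          bs) (pvSetdefault bs catp.1 []))
      = pvSetWith bs catp.1 (fun old => pvMerge1 old catp.2) [] := by
  have hstep : ∀ (bs : List (String × List (String × List (String × List Int))))
      (stp : String × List (String × List Int)),
      (stp.2.foldl (fun bs dayp =>
          pvModifyAt bs catp.1 (fun d1 => pvModifyAt d1 stp.1 (fun d2 => pvSetAt d2 dayp.1 dayp.2)))
        (pvModifyAt bs catp.1 (fun d1 => pvSetdefault d1 stp.1 [])))
        = pvModifyAt bs catp.1 (fun d1 => pvSetWith d1 stp.1 (fun d2 => pvMerge2 d2 stp.2) []) := by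
    intro bs stp
    rw [pvFoldl_pvModifyAt, pvModifyAt_pvModifyAt]
    congr 1
    funext d1
    rw [pvFoldl_pvModifyAt, pvModifyAt_pvSetdefault]
    rfl
  calc (catp.2.foldl (fun bs stp =>
          let bs := pvModifyAt bs catp.1 (fun d1 => pvSetdefault d1 stp.1 [])
          stp.2.foldl (fun bs dayp =>
            pvModifyAt bs catp.1 (fun d1 => pvModifyAt d1 stp.1 (fun d2 => pvSetAt d2 dayp.1 dayp.2)))
            bs) (pvSetdefault bs catp.1 []))
      = (catp.2.foldl (fun bs stp =>
          pvModifyAt bs catp.1 (fun d1 => pvSetWith d1 stp.1 (fun d2 => pvMerge2 d2 stp.2) []))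
          (pvSetdefault bs catp.1 [])) := by
        apply List.foldl_ext
        intro b x _hx
        exact hstep b x
    _ = pvModifyAt (pvSetdefault bs catp.1 [])
          catp.1 (fun d1 => catp.2.foldl (fun d1 stp =>
            pvSetWith d1 stp.1 (fun d2 => pvMerge2 d2 stp.2) []) d1) := by
        exact pvFoldl_pvModifyAt catp.2 _ catp.1 _
    _ = pvSetWith bs catp.1 (fun old => pvMerge1 old catp.2) [] := by
        rw [pvModifyAt_pvSetdefault]; rfl

-- ===== VERDICT (by name: the statement is the Claim_ definition above) =====
theorem apply_schedule_overrides_to_schedules_spec : Claim_equal_apply_schedule_overrides_to_schedules := by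
  intro base_schedules overrides _hdom
  show _ = _
  unfold apply_schedule_overrides_to_schedules apply_schedule_overrides_to_schedules_alt pvMerge0
  apply List.foldl_ext
  intro b x _hx
  exact pvStep_eq b x
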